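-- pv_equiv track=rewrite | github.com/JayWadekar/gwIAS-HM | Pipeline/utils.py | index_after_removal
-- ===== SOURCE A (Python) =====
-- def index_after_removal(lst, target, to_remove=None):
--     found_remove = False
--     for i, x in enumerate(lst):
--         if x == target:
--             return i - 1 if found_remove else i
--         if to_remove is not None and x == to_remove:
--             found_remove = True
--     return None
-- ===== SOURCE B (Python) =====
-- def index_after_removal(lst, target, to_remove=None):
--     try:
--         i = lst.index(target)
--     except ValueError:
--         return None
--     if to_remove is not None and to_remove in lst[:i]:
--         return i - 1
--     return i
-- ===== Notes on version B (the rewrite author's own statement) =====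
-- stated objective: simpler
-- what changed: Replaces A's single fused scan with a found_remove flag by list.index to locate the target followed by a separate membership test on the prefix before it.
import Mathlib
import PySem

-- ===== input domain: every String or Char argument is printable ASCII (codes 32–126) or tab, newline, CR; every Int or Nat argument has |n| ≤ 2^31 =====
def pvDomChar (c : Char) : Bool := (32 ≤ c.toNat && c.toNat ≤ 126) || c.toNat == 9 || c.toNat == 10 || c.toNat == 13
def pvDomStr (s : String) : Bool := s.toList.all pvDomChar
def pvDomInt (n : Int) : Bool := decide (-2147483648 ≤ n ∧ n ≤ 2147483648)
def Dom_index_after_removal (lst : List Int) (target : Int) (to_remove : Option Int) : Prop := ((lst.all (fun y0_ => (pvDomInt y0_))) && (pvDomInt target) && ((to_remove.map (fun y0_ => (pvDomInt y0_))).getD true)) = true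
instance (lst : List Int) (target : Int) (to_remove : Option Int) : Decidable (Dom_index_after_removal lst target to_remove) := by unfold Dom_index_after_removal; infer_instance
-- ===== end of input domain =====

-- B replaces A's fused scan-with-flag by an index lookup plus a membership test on the prefix (simpler decomposition).

-- ===== PORT A =====
-- A's loop: enumerate lst carrying the index i and the found_remove flag.
def indexAfterRemovalGo (lst : List Int) (target : Int) (to_remove : Option Int)
    (i : Int) (found : Bool) : Option Int :=
  match lst with
  | [] => none
  | x :: rest =>
    if x = target then (if found then some (i - 1) else some i)
    else
      indexAfterRemovalGo rest target to_remove (i + 1)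
        (if to_remove ≠ none ∧ to_remove = some x then true else found)

def index_after_removal (lst : List Int) (target : Int) (to_remove : Option Int) : Option Int :=
  indexAfterRemovalGo lst target to_remove 0 false

-- ===== PORT B =====
def index_after_removal_alt (lst : List Int) (target : Int) (to_remove : Option Int) : Option Int :=
  match PySem.List.index? lst target with
  | none => none
  | some i =>
    match to_remove with
    | some r =>
      if (PySem.List.slice lst none (some (i : Int))).contains r then some ((i : Int) - 1)
      else some (i : Int)
    | none => some (i : Int)

-- ===== PRECONDITION & SPEC =====
def Spec_index_after_removal (lst : List Int) (target : Int) (to_remove : Option Int) (out : Option Int) : Prop := out = index_after_removal_alt lst target to_remove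
instance (lst : List Int) (target : Int) (to_remove : Option Int) (out : Option Int) : Decidable (Spec_index_after_removal lst target to_remove out) := by unfold Spec_index_after_removal; infer_instance

-- ===== CLAIM (what is proved, stated in full; the proofs are below) =====
def Claim_equal_index_after_removal : Prop := ∀ (lst : List Int) (target : Int) (to_remove : Option Int), Dom_index_after_removal lst target to_remove → Spec_index_after_removal lst target to_remove (index_after_removal lst target to_remove)

-- ===== LEMMAS AND PROOFS =====

-- Characterisation of A's loop: result = start index + target position, minus one
-- iff the flag was already set or to_remove occurs in the prefix before the target.
theorem indexAfterRemovalGo_eq (lst : List Int) (target : Int) (to_remove : Option Int)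
    (i : Int) (found : Bool) :
    indexAfterRemovalGo lst target to_remove i found =
      (match PySem.List.index? lst target with
       | none => none
       | some k =>
         some (i + (k : Int) -
           (if found = true ∨ (∃ r, to_remove = some r ∧ r ∈ lst.take k) then 1 else 0))) := by
  induction lst generalizing i found with
  | nil => simp [indexAfterRemovalGo, PySem.List.index?]
  | cons x rest ih =>
    by_cases hx : x = target
    · subst hx
      rw [PySem.List.index?_cons_self]
      simp only [indexAfterRemovalGo, List.take_zero]
      rcases found with _ | _ <;> simp
    · rw [PySem.List.index?_cons_of_ne rest hx]
      simp only [indexAfterRemovalGo, if_neg hx]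
      rw [ih]
      cases hidx : PySem.List.index? rest target with
      | none => simp
      | some k =>
        simp only [Option.map_some]
        congr 1
        have hcond : ((if to_remove ≠ none ∧ to_remove = some x then true else found) = true
              ∨ (∃ r, to_remove = some r ∧ r ∈ rest.take k))
            ↔ (found = true ∨ (∃ r, to_remove = some r ∧ r ∈ (x :: rest).take (k + 1))) := by
          cases to_remove with
          | none => simp
          | some t =>
            by_cases ht : t = x <;> simp [List.take_succ_cons, ht]
        by_cases h : found = true ∨ (∃ r, to_remove = some r ∧ r ∈ (x :: rest).take (k + 1))
        · rw [if_pos (hcond.mpr h), if_pos h]; push_cast; ring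
        · rw [if_neg (fun hc => h (hcond.mp hc)), if_neg h]; push_cast; ring

-- ===== VERDICT (by name: the statement is the Claim_ definition above) =====
theorem index_after_removal_spec : Claim_equal_index_after_removal := by
  intro lst target to_remove _
  unfold Spec_index_after_removal index_after_removal index_after_removal_alt
  rw [indexAfterRemovalGo_eq]
  cases hidx : PySem.List.index? lst target with
  | none => simp
  | some k =>
    simp only [zero_add]
    cases to_remove with
    | none => simp
    | some r =>
      rw [PySem.List.slice_to_natCast]
      by_cases hr : r ∈ lst.take k
      · rw [if_pos (by exact Or.inr ⟨r, rfl, hr⟩)]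
        simp [hr]
      · rw [if_neg (by rintro (h | ⟨r', hr', hm⟩); · simp at h
                       · cases hr'; exact hr hm)]
        simp [hr]
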